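-- pv_equiv track=rewrite | github.com/p-ortega/mf6rtm | mf6rtm/utils.py | rearrange_copy_blocks
-- ===== SOURCE A (Python) =====
-- def rearrange_copy_blocks(script):
--     lines = script.split('\n')
--     copy_blocks = []
--     end_blocks = []
--     other_blocks = []
--
--     # Separate the lines into COPY blocks, END blocks, and other blocks
--     for line in lines:
--         if line.startswith('COPY'):
--             copy_blocks.append(line)
--         else:
--             other_blocks.append(line)
--
--     # Combine the blocks, putting the COPY blocks at the end and avoiding consecutive END blocks
--     rearranged_script = []
--     for block in other_blocks + copy_blocks:
--         rearranged_script.append(block)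
--
--     # Join the lines back together into a single script string
--     rearranged_script = '\n'.join(rearranged_script)
--
--     return rearranged_script
-- ===== SOURCE B (Python) =====
-- def rearrange_copy_blocks(script):
--     # Stable sort on a boolean key: non-COPY lines (False) first, COPY lines (True) last,
--     # each group keeping its original order.
--     return '\n'.join(sorted(script.split('\n'), key=lambda l: l.startswith('COPY')))
-- ===== Notes on version B (the rewrite author's own statement) =====
-- stated objective: idiomatic
-- what changed: Replaces the explicit two-accumulator partition loop and rebuild loop with a single stable sort of the split lines keyed on the boolean line-prefix test, relying on False<True and sort stability.
import Mathlib
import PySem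

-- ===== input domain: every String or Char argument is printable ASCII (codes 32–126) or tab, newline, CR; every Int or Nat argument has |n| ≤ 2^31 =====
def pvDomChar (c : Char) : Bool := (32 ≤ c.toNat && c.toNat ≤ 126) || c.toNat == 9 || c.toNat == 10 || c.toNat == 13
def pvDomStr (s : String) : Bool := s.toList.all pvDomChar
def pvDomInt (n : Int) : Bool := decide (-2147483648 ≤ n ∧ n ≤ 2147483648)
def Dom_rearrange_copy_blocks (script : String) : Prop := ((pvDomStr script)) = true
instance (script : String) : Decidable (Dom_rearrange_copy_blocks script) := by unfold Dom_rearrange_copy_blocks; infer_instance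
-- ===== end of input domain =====

-- B replaces A's two-accumulator partition loop by one stable sort keyed on startswith('COPY') (idiomatic; not claimed faster).

-- ===== PORT A =====
-- transliteration of A: split, a partition loop into copy_blocks/other_blocks,
-- a rebuild loop over other_blocks + copy_blocks, then join.
def rearrange_copy_blocks (script : String) : String :=
  let lines := (PySem.Str.split? script "\n").getD []   -- sep "\n" ≠ "", so split? is always `some`
  let p := lines.foldl
    (fun (acc : List String × List String) line =>
      if PySem.Str.startswith line "COPY" then (acc.1 ++ [line], acc.2)
      else (acc.1, acc.2 ++ [line]))
    ([], [])
  let copy_blocks := p.1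
  let other_blocks := p.2
  let rearranged := (other_blocks ++ copy_blocks).foldl (fun acc b => acc ++ [b]) ([] : List String)
  PySem.Str.join "\n" rearranged

-- ===== PORT B =====
-- transliteration of B: '\n'.join(sorted(script.split('\n'), key=lambda l: l.startswith('COPY')))
def rearrange_copy_blocks_alt (script : String) : String :=
  PySem.Str.join "\n"
    (PySem.List.sorted ((PySem.Str.split? script "\n").getD [])
      (fun l => PySem.Str.startswith l "COPY"))

-- ===== PRECONDITION & SPEC =====
def Spec_rearrange_copy_blocks (script : String) (out : String) : Prop := out = rearrange_copy_blocks_alt script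
instance (script : String) (out : String) : Decidable (Spec_rearrange_copy_blocks script out) := by unfold Spec_rearrange_copy_blocks; infer_instance

-- ===== CLAIM (what is proved, stated in full; the proofs are below) =====
def Claim_equal_rearrange_copy_blocks : Prop := ∀ (script : String), Dom_rearrange_copy_blocks script → Spec_rearrange_copy_blocks script (rearrange_copy_blocks script)

-- ===== LEMMAS AND PROOFS =====

-- inserting a false-keyed element in front of an all-true-keyed list puts it first
theorem insertBy_all_true {α : Type} (key : α → Bool) (x : α) (hx : key x = false) :
    ∀ T : List α, (∀ y ∈ T, key y = true) →
      PySem.List.insertBy (fun a b => decide (key a < key b)) x T = x :: T := by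
  intro T hT
  cases T with
  | nil => simp [PySem.List.insertBy]
  | cons t ts =>
    have ht : key t = true := hT t (by simp)
    simp [PySem.List.insertBy, hx, ht]

-- inserting into F ++ T (F all false-keyed, T all true-keyed)
theorem insertBy_partition {α : Type} (key : α → Bool) (x : α) :
    ∀ (F T : List α), (∀ y ∈ F, key y = false) → (∀ y ∈ T, key y = true) →
      PySem.List.insertBy (fun a b => decide (key a < key b)) x (F ++ T) =
        cond (key x) (F ++ T ++ [x]) (F ++ x :: T) := by
  intro F T hF hT
  cases hx : key x with
  | true =>
    simp only [cond_true]
    rw [PySem.List.insertBy_of_forall_not_before _ _ _ (by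
      intro y hy
      cases hky : key y <;> simp [hx])]
  | false =>
    simp only [cond_false]
    induction F with
    | nil => simpa using insertBy_all_true key x hx T hT
    | cons f F ih =>
      have hf : key f = false := hF f (by simp)
      simp only [List.cons_append, PySem.List.insertBy, hx, hf]
      simp only [decide_eq_true_eq]
      rw [if_neg (by simp)]
      rw [ih (fun y hy => hF y (by simp [hy]))]

-- the insertion-sort fold with a boolean key is a stable partition
theorem foldl_insertBy_partition {α : Type} (key : α → Bool) :
    ∀ (xs F T : List α), (∀ y ∈ F, key y = false) → (∀ y ∈ T, key y = true) →
      xs.foldl (fun acc x => PySem.List.insertBy (fun a b => decide (key a < key b)) x acc) (F ++ T)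
        = (F ++ xs.filter (fun x => !key x)) ++ (T ++ xs.filter key) := by
  intro xs
  induction xs with
  | nil => intro F T _ _; simp
  | cons x xs ih =>
    intro F T hF hT
    simp only [List.foldl_cons]
    rw [insertBy_partition key x F T hF hT]
    cases hx : key x with
    | true =>
      simp only [cond_true, List.append_assoc]
      rw [ih F (T ++ [x]) hF (by intro y hy
                                 rcases List.mem_append.mp hy with h | h
                                 · exact hT y h
                                 · simp at h; simp [h, hx])]
      simp [hx]
    | false =>
      simp only [cond_false]
      have hFx : F ++ x :: T = (F ++ [x]) ++ T := by simp
      rw [hFx, ih (F ++ [x]) T (by intro y hy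
                                   rcases List.mem_append.mp hy with h | h
                                   · exact hF y h
                                   · simp at h; simp [h, hx]) hT]
      simp [hx]

-- A's body equals B's body, over an arbitrary line list and boolean key
theorem partition_join_eq_sorted_join (lines : List String) (key : String → Bool) :
    PySem.Str.join "\n"
      (((lines.foldl
          (fun (acc : List String × List String) line =>
            if key line then (acc.1 ++ [line], acc.2) else (acc.1, acc.2 ++ [line]))
          ([], [])).2 ++
        (lines.foldl
          (fun (acc : List String × List String) line =>
            if key line then (acc.1 ++ [line], acc.2) else (acc.1, acc.2 ++ [line]))
          ([], [])).1).foldl (fun acc b => acc ++ [b]) ([] : List String))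
      = PySem.Str.join "\n" (PySem.List.sorted lines key) := by
  have hsplit : (fun (acc : List String × List String) line =>
      if key line then (acc.1 ++ [line], acc.2) else (acc.1, acc.2 ++ [line]))
      = (fun (acc : List String × List String) line =>
          ((if key line then acc.1 ++ [line] else acc.1),
           (if !key line then acc.2 ++ [line] else acc.2))) := by
    funext acc line
    cases key line <;> simp
  have hpair : lines.foldl
      (fun (acc : List String × List String) line =>
        if key line then (acc.1 ++ [line], acc.2) else (acc.1, acc.2 ++ [line]))
      ([], [])
      = (lines.filter key, lines.filter (fun l => !key l)) := by
    rw [hsplit,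
      PySem.List.foldl_prod_mk (fun s e => if key e then s ++ [e] else s)
        (fun s e => if !key e then s ++ [e] else s) lines [] []]
    refine Prod.ext ?_ ?_
    · simpa using PySem.List.foldl_append_if key (fun x => x) lines []
    · simpa using PySem.List.foldl_append_if (fun x => !key x) (fun x => x) lines []
  rw [hpair]
  rw [PySem.List.foldl_append_singleton]
  rw [PySem.List.sorted_eq_foldl_insertBy]
  have h := foldl_insertBy_partition key lines [] [] (by simp) (by simp)
  simp only [List.nil_append, List.append_nil] at h
  rw [h]
  simp

theorem rearrange_eq (script : String) :
    rearrange_copy_blocks script = rearrange_copy_blocks_alt script := by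
  unfold rearrange_copy_blocks rearrange_copy_blocks_alt
  exact partition_join_eq_sorted_join ((PySem.Str.split? script "\n").getD [])
    (fun l => PySem.Str.startswith l "COPY")

-- ===== VERDICT (by name: the statement is the Claim_ definition above) =====
theorem rearrange_copy_blocks_spec : Claim_equal_rearrange_copy_blocks := by
  intro script _
  unfold Spec_rearrange_copy_blocks
  exact rearrange_eq script
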